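-- pv_equiv track=rewrite | github.com/cellularmitosis/leopard.sh | leopardsh/utils/txt-fix.py | fix_upstream
-- ===== SOURCE A (Python) =====
-- def fix_upstream(lines):
--     lines2 = []
--     i = 0
--     while i < len(lines):
--         line = lines[i]
--         if i < (len(lines) - 1) and "srcmirror=" in line:
--             line2 = lines[i+1]
--             if "tarball=" in line2:
--                 line = "upstream=%s/%s" % (line.split("=")[1], line2.split("=")[1])
--                 lines2.append(line)
--                 i += 2
--                 continue
--
--         lines2.append(line)
--         i += 1
--         continue
--     return lines2
-- ===== SOURCE B (Python) =====
-- def fix_upstream(lines):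
--     out = []
--     pending = None
--     for line in lines:
--         if pending is not None:
--             if "tarball=" in line:
--                 out.append("upstream=%s/%s" % (pending.split("=")[1], line.split("=")[1]))
--                 pending = None
--                 continue
--             out.append(pending)
--             pending = None
--         if "srcmirror=" in line:
--             pending = line
--         else:
--             out.append(line)
--     if pending is not None:
--         out.append(pending)
--     return out
-- ===== Notes on version B (the rewrite author's own statement) =====
-- stated objective: alternative
-- what changed: Replaces the index-based while loop with i+1 lookahead (and i += 2 skips) by a single for-loop over the lines keeping a one-element pending buffer for an unmerged srcmirror line, flushed after the loop.
import Mathlib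
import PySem

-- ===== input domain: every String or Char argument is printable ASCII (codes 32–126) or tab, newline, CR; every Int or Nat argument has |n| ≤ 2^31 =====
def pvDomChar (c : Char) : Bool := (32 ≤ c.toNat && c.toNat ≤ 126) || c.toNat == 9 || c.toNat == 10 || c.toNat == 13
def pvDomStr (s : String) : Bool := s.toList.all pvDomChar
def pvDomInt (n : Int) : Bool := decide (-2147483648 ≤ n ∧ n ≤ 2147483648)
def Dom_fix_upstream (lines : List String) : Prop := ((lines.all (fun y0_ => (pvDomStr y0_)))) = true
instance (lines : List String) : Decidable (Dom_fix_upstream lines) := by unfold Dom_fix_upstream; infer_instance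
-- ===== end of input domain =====

-- B replaces A's index-based while loop with i+1 lookahead by a single for-loop
-- keeping a one-element pending buffer (objective: alternative decomposition).


-- "upstream=%s/%s" % (line.split("=")[1], line2.split("=")[1])  (shared by both Pythons verbatim)
def pvMerge (line line2 : String) : String :=
  "upstream=" ++ PySem.List.pyGetD ((PySem.Str.split? line "=").getD []) 1 "" ++ "/" ++
    PySem.List.pyGetD ((PySem.Str.split? line2 "=").getD []) 1 ""

-- ===== PORT A =====
-- A's while loop over index i, with lookahead at i+1 and i += 2 on a merge;
-- 'i < len-1' is 'at least two lines remain', so the recursion is on the remaining suffix.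
def fixA : List String → List String
  | [] => []
  | [line] => [line]
  | line :: line2 :: rest =>
    if PySem.Str.isIn "srcmirror=" line then
      if PySem.Str.isIn "tarball=" line2 then
        pvMerge line line2 :: fixA rest
      else
        line :: fixA (line2 :: rest)
    else
      line :: fixA (line2 :: rest)

def fix_upstream (lines : List String) : List String := fixA lines

-- ===== PORT B =====
-- B's for loop carrying a pending buffer, flushed after the loop.
def fixB (pending : Option String) : List String → List String
  | [] => match pending with
          | some p => [p]
          | none => []
  | line :: rest =>
    match pending with
    | some p =>
      if PySem.Str.isIn "tarball=" line then
        pvMerge p line :: fixB none rest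
      else
        p :: (if PySem.Str.isIn "srcmirror=" line then fixB (some line) rest
              else line :: fixB none rest)
    | none =>
      if PySem.Str.isIn "srcmirror=" line then fixB (some line) rest
      else line :: fixB none rest

def fix_upstream_alt (lines : List String) : List String := fixB none lines

-- ===== PRECONDITION & SPEC =====
def Spec_fix_upstream (lines : List String) (out : List String) : Prop := out = fix_upstream_alt lines
instance (lines : List String) (out : List String) : Decidable (Spec_fix_upstream lines out) := by unfold Spec_fix_upstream; infer_instance

-- ===== CLAIM (what is proved, stated in full; the proofs are below) =====
def Claim_equal_fix_upstream : Prop := ∀ (lines : List String), Dom_fix_upstream lines → Spec_fix_upstream lines (fix_upstream lines)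

-- ===== LEMMAS AND PROOFS =====
-- A line without "srcmirror=" is always emitted as-is by A.
theorem fixA_cons (line : String) (rest : List String)
    (hs : ¬ PySem.Str.isIn "srcmirror=" line = true) :
    fixA (line :: rest) = line :: fixA rest := by
  cases rest with
  | nil => rfl
  | cons l2 r => simp only [fixA]; rw [if_neg hs]

-- Joint invariant, by strong induction on the length of the remaining lines:
-- with an empty buffer B agrees with A, and with a pending line p in the buffer
-- (B only ever buffers a line; the merge uses it exactly as A uses lines[i])
-- B agrees with A restarted at p :: lines, provided p contains "srcmirror=".
theorem fixB_eq_fixA (n : Nat) : ∀ (lines : List String), lines.length ≤ n →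
    fixB none lines = fixA lines ∧
    ∀ p, PySem.Str.isIn "srcmirror=" p = true → fixB (some p) lines = fixA (p :: lines) := by
  induction n with
  | zero =>
    intro lines h
    have : lines = [] := List.eq_nil_of_length_eq_zero (Nat.le_zero.mp h)
    subst this
    exact ⟨rfl, fun p _ => rfl⟩
  | succ n ih =>
    intro lines h
    match lines with
    | [] => exact ⟨rfl, fun p _ => rfl⟩
    | line :: rest =>
      have hr : rest.length ≤ n := by simpa using Nat.succ_le_succ_iff.mp (by simpa using h)
      have hrest := ih rest hr
      constructor
      · -- empty buffer
        by_cases hs : PySem.Str.isIn "srcmirror=" line = true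
        · show (if PySem.Str.isIn "srcmirror=" line = true then fixB (some line) rest
                else line :: fixB none rest) = fixA (line :: rest)
          rw [if_pos hs, hrest.2 line hs]
        · match rest with
          | [] =>
            show (if PySem.Str.isIn "srcmirror=" line = true then fixB (some line) []
                  else line :: fixB none []) = [line]
            rw [if_neg hs]; rfl
          | l2 :: r =>
            show (if PySem.Str.isIn "srcmirror=" line = true then fixB (some line) (l2 :: r)
                  else line :: fixB none (l2 :: r)) = fixA (line :: l2 :: r)
            rw [if_neg hs, (ih (l2 :: r) hr).1, fixA_cons line (l2 :: r) hs]
      · -- pending buffer p, containing "srcmirror="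
        intro p hp
        show (if PySem.Str.isIn "tarball=" line = true then pvMerge p line :: fixB none rest
              else p :: (if PySem.Str.isIn "srcmirror=" line = true then fixB (some line) rest
                         else line :: fixB none rest)) = fixA (p :: line :: rest)
        unfold fixA
        rw [if_pos hp]
        by_cases ht : PySem.Str.isIn "tarball=" line = true
        · rw [if_pos ht, if_pos ht, hrest.1]
        · rw [if_neg ht, if_neg ht]
          by_cases hs : PySem.Str.isIn "srcmirror=" line = true
          · rw [if_pos hs, hrest.2 line hs]
          · rw [if_neg hs, hrest.1, fixA_cons line rest hs]
-- ===== VERDICT (by name: the statement is the Claim_ definition above) =====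
theorem fix_upstream_spec : Claim_equal_fix_upstream := by
  intro lines _
  unfold Spec_fix_upstream fix_upstream fix_upstream_alt
  exact ((fixB_eq_fixA lines.length lines le_rfl).1).symm
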